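-- pv_equiv track=rewrite | github.com/Brown-scripts/GhAIHack_CropDiseasePrediction | services/treatment_service.py | _normalize_disease_name
-- ===== SOURCE A (Python) =====
-- def _normalize_disease_name(disease_name: str) -> str:
--     """Normalize disease name for consistent matching"""
--     normalized = disease_name.lower().strip()
--     normalized = normalized.replace(" ", "_")
--     normalized = normalized.replace("-", "_").replace(".", "")
--
--     while "__" in normalized:
--         normalized = normalized.replace("__", "_")
--
--     normalized = normalized.strip("_")
--     return normalized
-- ===== SOURCE B (Python) =====
-- def _normalize_disease_name(disease_name: str) -> str:
--     """Normalize disease name in one left-to-right pass."""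
--     base = disease_name.lower().strip()
--     out = []
--     for c in base:
--         if c == '.':
--             continue
--         if c == ' ' or c == '-':
--             c = '_'
--         if c == '_' and out and out[-1] == '_':
--             continue
--         out.append(c)
--     return ''.join(out).strip('_')
-- ===== Notes on version B (the rewrite author's own statement) =====
-- stated objective: simpler
-- what changed: Replaces the chain of replace() calls and the rescanning while-loop underscore-collapse with a single left-to-right pass that skips dots, maps space/hyphen to underscore, and suppresses consecutive underscores on the fly.
import Mathlib
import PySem

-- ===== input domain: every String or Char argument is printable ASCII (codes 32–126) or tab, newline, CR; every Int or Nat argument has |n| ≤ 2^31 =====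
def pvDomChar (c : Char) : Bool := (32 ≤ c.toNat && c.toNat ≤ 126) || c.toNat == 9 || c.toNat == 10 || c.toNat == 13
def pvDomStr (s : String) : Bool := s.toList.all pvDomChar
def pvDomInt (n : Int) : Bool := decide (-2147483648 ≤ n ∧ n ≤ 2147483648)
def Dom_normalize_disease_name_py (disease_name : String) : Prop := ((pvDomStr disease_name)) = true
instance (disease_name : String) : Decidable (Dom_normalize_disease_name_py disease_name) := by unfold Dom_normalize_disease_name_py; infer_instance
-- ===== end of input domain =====

-- B replaces A's chain of replace() calls and its rescanning "__"-collapse while-loop by a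
-- single left-to-right pass that collapses underscores on the fly (objective: simpler).

-- ===== PORT A =====

-- model of one replace("__","_") pass, used (only) to prove A's while-loop terminates
def pvStep : List Char → List Char
  | [] => []
  | [c] => [c]
  | c :: d :: t => if c = '_' ∧ d = '_' then '_' :: pvStep t else c :: pvStep (d :: t)

theorem pvStep_go (fuel : Nat) : ∀ (l acc : List Char), l.length ≤ fuel →
    PySem.Chars.replace.go ['_','_'] ['_'] fuel l acc = acc.reverse ++ pvStep l := by
  induction fuel with
  | zero =>
    intro l acc h
    have : l = [] := List.length_eq_zero_iff.1 (Nat.le_zero.1 h)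
    subst this
    simp [PySem.Chars.replace.go, pvStep]
  | succ n ih =>
    intro l acc h
    cases l with
    | nil => simp [PySem.Chars.replace.go, pvStep]
    | cons c t =>
      cases t with
      | nil =>
        rw [PySem.Chars.replace.go]
        have : ¬ (List.isPrefixOf ['_','_'] [c] = true) := by simp [List.isPrefixOf]
        rw [if_neg this, ih [] _ (by simp)]
        simp [pvStep]
      | cons d t2 =>
        by_cases hud : c = '_' ∧ d = '_'
        · obtain ⟨h1, h2⟩ := hud; subst h1; subst h2
          rw [PySem.Chars.replace.go]
          simp only [List.isPrefixOf, BEq.rfl, Bool.and_self, if_pos]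
          rw [show ['_','_'].length = 2 from rfl]
          rw [show List.drop 2 ('_' :: '_' :: t2) = t2 from rfl]
          rw [ih t2 _ (by simp at h ⊢; omega)]
          simp [pvStep]
        · rw [PySem.Chars.replace.go]
          have : ¬ (List.isPrefixOf ['_','_'] (c :: d :: t2) = true) := by
            simp [List.isPrefixOf]
            intro h1 h2; exact hud ⟨h1.symm, h2.symm⟩
          rw [if_neg this, ih (d :: t2) _ (by simp at h ⊢; omega)]
          rw [pvStep]
          rw [if_neg hud]
          simp

theorem pvReplace_dd (s : List Char) :
    PySem.Chars.replace s ['_','_'] ['_'] = pvStep s := by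
  rw [PySem.Chars.replace]
  simp only [List.isEmpty_cons, Bool.false_eq_true, if_false]
  rw [pvStep_go s.length s [] (le_refl _)]
  simp

theorem pvStep_len (s : List Char) :
    (pvStep s).length ≤ s.length ∧ (['_','_'] <:+: s → (pvStep s).length < s.length) := by
  induction s using pvStep.induct with
  | case1 => simp [pvStep]
  | case2 c =>
    refine ⟨by simp [pvStep], fun h => absurd h.length_le (by simp)⟩
  | case3 c d t hud ih =>
    rw [pvStep, if_pos hud]
    exact ⟨by simp; omega, fun _ => by simp; have := ih.1; omega⟩
  | case4 c d t hud ih =>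
    rw [pvStep, if_neg hud]
    refine ⟨by simp; exact ih.1, fun h => ?_⟩
    rcases List.infix_cons_iff.1 h with hp | hi
    · exfalso
      obtain ⟨r, hr⟩ := hp
      simp at hr
      exact hud ⟨hr.1.symm, hr.2.1.symm⟩
    · have := ih.2 hi; simp at this ⊢; omega

-- the 'while "__" in normalized: normalized = normalized.replace("__", "_")' loop of A
def pyWhileCollapse (s : String) : String :=
  if PySem.Str.isIn "__" s then pyWhileCollapse (PySem.Str.replace s "__" "_") else s
termination_by s.toList.length
decreasing_by
  rename_i h
  have h' : PySem.Chars.isIn ['_','_'] s.toList = true := by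
    simpa [PySem.Str.isIn] using h
  have e : (PySem.Str.replace s "__" "_").toList = pvStep s.toList := by
    show (String.ofList (PySem.Chars.replace s.toList "__".toList "_".toList)).toList = _
    rw [show ("__".toList) = ['_','_'] by rfl, show ("_".toList) = ['_'] by rfl,
      pvReplace_dd]
    simp
  rw [e]
  exact (pvStep_len s.toList).2 ((PySem.Chars.isIn_iff_infix _ _).1 h')

def normalize_disease_name_py (disease_name : String) : String :=
  let normalized := PySem.Str.strip (PySem.Str.lower disease_name)
  let normalized := PySem.Str.replace normalized " " "_"
  let normalized := PySem.Str.replace (PySem.Str.replace normalized "-" "_") "." ""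
  let normalized := pyWhileCollapse normalized
  PySem.Str.stripChars normalized "_"

-- ===== PORT B =====
def normalize_disease_name_py_alt (disease_name : String) : String :=
  let base := PySem.Str.strip (PySem.Str.lower disease_name)
  let out := base.toList.foldl (fun acc c =>
      if c = '.' then acc
      else
        let c' := if c = ' ' ∨ c = '-' then '_' else c
        if c' = '_' ∧ acc.getLast? = some '_' then acc
        else acc ++ [c']) ([] : List Char)
  PySem.Str.stripChars (String.ofList out) "_"

-- ===== PRECONDITION & SPEC =====
def Spec_normalize_disease_name_py (disease_name : String) (out : String) : Prop := out = normalize_disease_name_py_alt disease_name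
instance (disease_name : String) (out : String) : Decidable (Spec_normalize_disease_name_py disease_name out) := by unfold Spec_normalize_disease_name_py; infer_instance

-- ===== CLAIM (what is proved, stated in full; the proofs are below) =====
def Claim_equal_normalize_disease_name_py : Prop := ∀ (disease_name : String), Dom_normalize_disease_name_py disease_name → Spec_normalize_disease_name_py disease_name (normalize_disease_name_py disease_name)

-- ===== LEMMAS AND PROOFS =====

-- full collapse of underscore runs: the common normal form of A's loop and B's pass

def pvCollapse : List Char → List Char
  | [] => []
  | c :: t =>
    if c = '_' then '_' :: pvCollapse (t.dropWhile (· == '_')) else c :: pvCollapse t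
termination_by s => s.length
decreasing_by
  · exact Nat.lt_succ_of_le (List.length_dropWhile_le _ _)
  · simp

theorem pvCollapse_nil : pvCollapse [] = [] := by rw [pvCollapse]

theorem pvStep_cons (c : Char) (t : List Char) : ∃ r, pvStep (c :: t) = c :: r := by
  cases t with
  | nil => exact ⟨[], rfl⟩
  | cons d t2 =>
    by_cases hud : c = '_' ∧ d = '_'
    · refine ⟨pvStep t2, ?_⟩; rw [pvStep, if_pos hud, hud.1]
    · exact ⟨pvStep (d :: t2), by rw [pvStep, if_neg hud]⟩

theorem pvCollapse_pvStep (n : Nat) : ∀ s : List Char, s.length ≤ n →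
    pvCollapse (pvStep s) = pvCollapse s ∧
    pvCollapse ((pvStep s).dropWhile (· == '_')) = pvCollapse (s.dropWhile (· == '_')) := by
  induction n with
  | zero =>
    intro s h
    have : s = [] := List.length_eq_zero_iff.1 (Nat.le_zero.1 h)
    subst this; exact ⟨rfl, rfl⟩
  | succ n ih =>
    intro s h
    have hG : pvCollapse (pvStep s) = pvCollapse s := by
      cases s with
      | nil => rfl
      | cons c t =>
        cases t with
        | nil => rfl
        | cons d t2 =>
          by_cases hud : c = '_' ∧ d = '_'
          · obtain ⟨h1, h2⟩ := hud; subst h1; subst h2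
            rw [pvStep, if_pos ⟨rfl, rfl⟩]
            rw [pvCollapse, if_pos rfl]
            conv_rhs => rw [pvCollapse, if_pos rfl]
            simp only [List.dropWhile]
            rw [show (('_' : Char) == '_') = true by simp]
            exact congrArg _ ((ih t2 (by simp at h; omega)).2)
          · rw [pvStep, if_neg hud]
            obtain ⟨r, hr⟩ := pvStep_cons d t2
            by_cases hc : c = '_'
            · subst hc
              have hd : ¬ d = '_' := fun hh => hud ⟨rfl, hh⟩
              rw [pvCollapse, if_pos rfl]
              conv_rhs => rw [pvCollapse, if_pos rfl]
              rw [hr]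
              simp only [List.dropWhile]
              rw [show ((d == '_') = false) by simp [hd]]
              rw [← hr]
              exact congrArg _ ((ih (d :: t2) (by simp at h ⊢; omega)).1)
            · rw [pvCollapse, if_neg hc]
              conv_rhs => rw [pvCollapse, if_neg hc]
              exact congrArg _ ((ih (d :: t2) (by simp at h ⊢; omega)).1)
    refine ⟨hG, ?_⟩
    cases s with
    | nil => rfl
    | cons c t =>
      by_cases hc : c = '_'
      · subst hc
        cases t with
        | nil => rfl
        | cons d t2 =>
          by_cases hd : d = '_'
          · subst hd
            rw [pvStep, if_pos ⟨rfl, rfl⟩]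
            simp only [List.dropWhile]
            rw [show (('_' : Char) == '_') = true by simp]
            exact (ih t2 (by simp at h; omega)).2
          · rw [pvStep, if_neg (fun hh => hd hh.2)]
            obtain ⟨r, hr⟩ := pvStep_cons d t2
            rw [hr]
            simp only [List.dropWhile]
            rw [show (('_' : Char) == '_') = true by simp]
            rw [show ((d == '_') = false) by simp [hd]]
            rw [← hr]
            exact (ih (d :: t2) (by simp at h ⊢; omega)).1
      · obtain ⟨r, hr⟩ := pvStep_cons c t
        rw [hr]
        simp only [List.dropWhile]
        rw [show ((c == '_') = false) by simp [hc]]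
        rw [← hr]
        exact hG

theorem pvCollapse_fix : ∀ (s : List Char), ¬ ['_','_'] <:+: s → pvCollapse s = s := by
  intro s
  induction s with
  | nil => intro _; exact pvCollapse_nil
  | cons c t ih =>
    intro h
    have ht : ¬ ['_','_'] <:+: t := fun hi => h (List.infix_cons_iff.2 (Or.inr hi))
    by_cases hc : c = '_'
    · subst hc
      have hdw : t.dropWhile (· == '_') = t := by
        cases t with
        | nil => rfl
        | cons d t2 =>
          have hd : ¬ d = '_' := by
            intro hd; subst hd
            exact h (List.infix_cons_iff.2 (Or.inl ⟨t2, rfl⟩))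
          simp only [List.dropWhile]
          rw [show ((d == '_') = false) by simp [hd]]
      rw [pvCollapse, if_pos rfl, hdw, ih ht]
    · rw [pvCollapse, if_neg hc, ih ht]

theorem pvWhile_eq_collapse (s : String) : (pyWhileCollapse s).toList = pvCollapse s.toList := by
  have main : ∀ (n : Nat) (s : String), s.toList.length ≤ n →
      (pyWhileCollapse s).toList = pvCollapse s.toList := by
    intro n
    induction n with
    | zero =>
      intro s h
      have h0 : s.toList = [] := List.length_eq_zero_iff.1 (Nat.le_zero.1 h)
      rw [pyWhileCollapse]
      have : PySem.Str.isIn "__" s = false := by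
        rw [PySem.Str.isIn, h0]
        rfl
      rw [this]
      simp only [Bool.false_eq_true, if_false, h0, pvCollapse_nil]
    | succ n ih =>
      intro s h
      rw [pyWhileCollapse]
      by_cases hin : PySem.Str.isIn "__" s = true
      · rw [if_pos hin]
        have h' : PySem.Chars.isIn ['_','_'] s.toList = true := by
          simpa [PySem.Str.isIn] using hin
        have hinf := (PySem.Chars.isIn_iff_infix _ _).1 h'
        have e : (PySem.Str.replace s "__" "_").toList = pvStep s.toList := by
          show (String.ofList (PySem.Chars.replace s.toList "__".toList "_".toList)).toList = _
          rw [show ("__".toList) = ['_','_'] by rfl, show ("_".toList) = ['_'] by rfl,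
            pvReplace_dd]
          simp
        have hlt := (pvStep_len s.toList).2 hinf
        rw [ih _ (by rw [e]; omega)]
        rw [e]
        exact (pvCollapse_pvStep s.toList.length s.toList (le_refl _)).1
      · rw [if_neg hin]
        have : ¬ ['_','_'] <:+: s.toList := by
          refine (PySem.Chars.isIn_eq_false_iff _ _).1 ?_
          have : PySem.Str.isIn "__" s = PySem.Chars.isIn ['_','_'] s.toList := rfl
          rw [← this]
          simpa using hin
        exact (pvCollapse_fix s.toList this).symm
  exact main s.toList.length s (le_refl _)

-- the character map of A's replace(" ","_").replace("-","_") and B's branch, and the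
-- mapped-and-dot-filtered stream both programs collapse
def pvMap (c : Char) : Char := if c = ' ' ∨ c = '-' then '_' else c

def pvFm (l : List Char) : List Char := (l.map pvMap).filter (fun c => !(c == '.'))

theorem pvGo_single (a b : Char) (fuel : Nat) : ∀ (l acc : List Char), l.length ≤ fuel →
    PySem.Chars.replace.go [a] [b] fuel l acc
      = acc.reverse ++ l.map (fun c => if c = a then b else c) := by
  induction fuel with
  | zero =>
    intro l acc h
    have : l = [] := List.length_eq_zero_iff.1 (Nat.le_zero.1 h)
    subst this; simp [PySem.Chars.replace.go]
  | succ n ih =>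
    intro l acc h
    cases l with
    | nil => simp [PySem.Chars.replace.go]
    | cons c t =>
      rw [PySem.Chars.replace.go]
      by_cases hc : c = a
      · subst hc
        simp only [List.isPrefixOf, BEq.rfl, Bool.and_self, if_pos]
        rw [show [c].length = 1 from rfl, show List.drop 1 (c :: t) = t from rfl]
        rw [ih t _ (by simp at h ⊢; omega)]
        simp
      · have : ¬ (List.isPrefixOf [a] (c :: t) = true) := by
          simp [List.isPrefixOf]; exact fun hh => hc hh.symm
        rw [if_neg this, ih t _ (by simp at h ⊢; omega)]
        simp [hc]

theorem pvReplace_single (s : List Char) (a b : Char) :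
    PySem.Chars.replace s [a] [b] = s.map (fun c => if c = a then b else c) := by
  rw [PySem.Chars.replace]
  simp only [List.isEmpty_cons, Bool.false_eq_true, if_false]
  rw [pvGo_single a b s.length s [] (le_refl _)]
  simp

theorem pvGo_del (a : Char) (fuel : Nat) : ∀ (l acc : List Char), l.length ≤ fuel →
    PySem.Chars.replace.go [a] [] fuel l acc
      = acc.reverse ++ l.filter (fun c => !(c == a)) := by
  induction fuel with
  | zero =>
    intro l acc h
    have : l = [] := List.length_eq_zero_iff.1 (Nat.le_zero.1 h)
    subst this; simp [PySem.Chars.replace.go]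
  | succ n ih =>
    intro l acc h
    cases l with
    | nil => simp [PySem.Chars.replace.go]
    | cons c t =>
      rw [PySem.Chars.replace.go]
      by_cases hc : c = a
      · subst hc
        simp only [List.isPrefixOf, BEq.rfl, Bool.and_self, if_pos]
        rw [show [c].length = 1 from rfl, show List.drop 1 (c :: t) = t from rfl]
        rw [ih t _ (by simp at h ⊢; omega)]
        simp [List.filter]
      · have : ¬ (List.isPrefixOf [a] (c :: t) = true) := by
          simp [List.isPrefixOf]; exact fun hh => hc hh.symm
        rw [if_neg this, ih t _ (by simp at h ⊢; omega)]
        have : (!(c == a)) = true := by simp [hc]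
        simp [List.filter, this]

theorem pvReplace_del (s : List Char) (a : Char) :
    PySem.Chars.replace s [a] [] = s.filter (fun c => !(c == a)) := by
  rw [PySem.Chars.replace]
  simp only [List.isEmpty_cons, Bool.false_eq_true, if_false]
  rw [pvGo_del a s.length s [] (le_refl _)]
  simp

-- A's three replaces compute exactly the mapped-and-filtered stream
theorem pvA_chain (x : String) :
    (PySem.Str.replace (PySem.Str.replace (PySem.Str.replace x " " "_") "-" "_") "." "").toList
      = pvFm x.toList := by
  show (String.ofList (PySem.Chars.replace
      (PySem.Str.replace (PySem.Str.replace x " " "_") "-" "_").toList ".".toList "".toList)).toList = _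
  rw [show (".".toList) = ['.'] by rfl, show ("".toList) = ([] : List Char) by rfl]
  rw [show (PySem.Str.replace (PySem.Str.replace x " " "_") "-" "_").toList
      = (String.ofList (PySem.Chars.replace (PySem.Str.replace x " " "_").toList "-".toList "_".toList)).toList from rfl]
  rw [show (PySem.Str.replace x " " "_").toList
      = (String.ofList (PySem.Chars.replace x.toList " ".toList "_".toList)).toList from rfl]
  rw [show (" ".toList) = [' '] by rfl, show ("-".toList) = ['-'] by rfl,
    show ("_".toList) = ['_'] by rfl]
  simp only [String.toList_ofList]
  rw [pvReplace_single, pvReplace_single, pvReplace_del]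
  rw [List.map_map]
  unfold pvFm
  congr 1
  apply List.map_congr_left
  intro c _
  simp only [Function.comp, pvMap]
  by_cases h1 : c = ' '
  · simp [h1]
  · by_cases h2 : c = '-' <;> simp [h1, h2]

-- B's fold with the 'last emitted char' read off the accumulator
def pvEmit (p : Option Char) : List Char → List Char
  | [] => []
  | c :: t =>
    if c = '.' then pvEmit p t
    else
      let c' := if c = ' ' ∨ c = '-' then '_' else c
      if c' = '_' ∧ p = some '_' then pvEmit p t
      else c' :: pvEmit (some c') t

theorem pvFold_emit : ∀ (l acc : List Char),
    l.foldl (fun acc c =>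
      if c = '.' then acc
      else
        let c' := if c = ' ' ∨ c = '-' then '_' else c
        if c' = '_' ∧ acc.getLast? = some '_' then acc
        else acc ++ [c']) acc
    = acc ++ pvEmit acc.getLast? l := by
  intro l
  induction l with
  | nil => intro acc; simp [pvEmit]
  | cons c t ih =>
    intro acc
    rw [List.foldl_cons, pvEmit]
    by_cases hdot : c = '.'
    · rw [if_pos hdot, if_pos hdot, ih acc]
    · rw [if_neg hdot, if_neg hdot]
      simp only []
      by_cases hcond : (if c = ' ' ∨ c = '-' then '_' else c) = '_' ∧ acc.getLast? = some '_'
      · rw [if_pos hcond, if_pos hcond, ih acc]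
      · rw [if_neg hcond, if_neg hcond, ih _]
        rw [List.getLast?_concat]
        simp

theorem pvEmit_collapse : ∀ (l : List Char) (p : Option Char),
    pvEmit p l = if p = some '_' then pvCollapse ((pvFm l).dropWhile (· == '_'))
                 else pvCollapse (pvFm l) := by
  intro l
  induction l with
  | nil => intro p; simp [pvEmit, pvFm, pvCollapse_nil]
  | cons c t ih =>
    intro p
    rw [pvEmit]
    have hfm : pvFm (c :: t) = if pvMap c = '.' then pvFm t else pvMap c :: pvFm t := by
      unfold pvFm
      simp only [List.map_cons, List.filter]
      by_cases hh : pvMap c = '.'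
      · rw [if_pos hh, show ((pvMap c == '.') = true) by simp [hh]]
        simp
      · rw [if_neg hh, show ((pvMap c == '.') = false) by simp [hh]]
        simp
    by_cases hdot : c = '.'
    · rw [if_pos hdot]
      have : pvMap c = '.' := by subst hdot; simp [pvMap]
      rw [ih p, hfm, if_pos this]
    · rw [if_neg hdot]
      have hmc : pvMap c = (if c = ' ' ∨ c = '-' then '_' else c) := rfl
      have hnd : ¬ pvMap c = '.' := by
        rw [hmc]; by_cases hsp : c = ' ' ∨ c = '-' <;> simp [hsp, hdot]
      rw [hfm, if_neg hnd]
      simp only []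
      by_cases hc' : (if c = ' ' ∨ c = '-' then '_' else c) = '_'
      · -- emitted char is '_'
        by_cases hp : p = some '_'
        · rw [if_pos ⟨hc', hp⟩, ih p, if_pos hp, if_pos hp]
          rw [← hmc] at hc'
          rw [hc']
          simp only [List.dropWhile]
          rw [show (('_' : Char) == '_') = true by simp]
        · rw [if_neg (fun hh => hp hh.2), ih (some _), hc', if_pos rfl, if_neg hp]
          rw [← hmc] at hc'
          rw [hc']
          rw [pvCollapse, if_pos rfl]
      · rw [if_neg (fun hh => hc' hh.1), ih (some _)]
        have hcu : ¬ pvMap c = '_' := by rw [hmc]; exact hc'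
        have hsome : ¬ ((some (if c = ' ' ∨ c = '-' then '_' else c)) = some ('_' : Char)) := by
          intro hh; exact hc' (Option.some_injective _ hh)
        rw [if_neg hsome, ← hmc]
        by_cases hp : p = some '_'
        · rw [if_pos hp]
          simp only [List.dropWhile]
          rw [show ((pvMap c == '_') = false) by simp [hcu]]
          rw [pvCollapse, if_neg hcu]
        · rw [if_neg hp]
          rw [pvCollapse, if_neg hcu]

-- ===== VERDICT (by name: the statement is the Claim_ definition above) =====
theorem normalize_disease_name_py_spec : Claim_equal_normalize_disease_name_py := by
  intro s _
  unfold Spec_normalize_disease_name_py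
  unfold normalize_disease_name_py normalize_disease_name_py_alt
  dsimp only
  refine congrArg (fun z => PySem.Str.stripChars z "_") ?_
  apply String.ext
  rw [pvWhile_eq_collapse, pvA_chain, String.toList_ofList, pvFold_emit _ [], pvEmit_collapse]
  simp
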